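-- pv_equiv track=rewrite | github.com/openpathsampling/openpathsampling | openpathsampling/experimental/path_tree/path_tree.py | make_segments
-- ===== SOURCE A (Python) =====
-- from collections import namedtuple
--
-- TrajectorySegments = namedtuple("TrajectorySegments", ['existing', 'new'])
--
-- def make_segments(prev, trial):
--     """Identify new and existing segments.
--     """
--     prev_traj = set(prev)  # as set for lookup performance
--     start = None
--     prev_mode = None
--     results = {'existing': [], 'new': []}
--     for idx, snap in enumerate(trial):
--         mode = {True: 'existing', False: 'new'}[snap in prev_traj]
--         if mode != prev_mode:
--             if start is not None:
--                 results[prev_mode].append((start, idx))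
--             start = idx
--         prev_mode = mode
--
--     if prev_mode is not None:
--         results[prev_mode].append((start, idx + 1))
--
--     return TrajectorySegments(**results)
-- ===== SOURCE B (Python) =====
-- import itertools
-- from collections import namedtuple
--
-- TrajectorySegments = namedtuple("TrajectorySegments", ['existing', 'new'])
--
-- def make_segments(prev, trial):
--     """Identify new and existing segments (run-splitting via groupby)."""
--     prev_traj = set(prev)
--     existing, new = [], []
--     idx = 0
--     for is_existing, group in itertools.groupby(trial, key=lambda s: s in prev_traj):
--         length = sum(1 for _ in group)
--         (existing if is_existing else new).append((idx, idx + length))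
--         idx += length
--     return TrajectorySegments(existing=existing, new=new)
-- ===== Notes on version B (the rewrite author's own statement) =====
-- stated objective: idiomatic
-- what changed: Replaces A's transition-detecting scan with start/prev_mode state variables and a post-loop flush by an itertools.groupby run decomposition: each maximal same-membership run directly yields one (idx, idx+length) segment.
import Mathlib
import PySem

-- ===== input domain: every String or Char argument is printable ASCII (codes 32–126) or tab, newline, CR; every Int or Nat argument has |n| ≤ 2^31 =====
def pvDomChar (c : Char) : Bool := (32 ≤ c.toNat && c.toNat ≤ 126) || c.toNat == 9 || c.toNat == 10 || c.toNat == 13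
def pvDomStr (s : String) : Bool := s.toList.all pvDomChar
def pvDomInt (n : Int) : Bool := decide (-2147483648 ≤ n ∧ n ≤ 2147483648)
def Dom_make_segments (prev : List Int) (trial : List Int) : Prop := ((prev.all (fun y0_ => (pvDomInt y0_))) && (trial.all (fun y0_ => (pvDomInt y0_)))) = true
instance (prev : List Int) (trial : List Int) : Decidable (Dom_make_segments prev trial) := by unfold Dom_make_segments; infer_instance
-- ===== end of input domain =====

-- B replaces A's start/prev_mode transition bookkeeping by splitting the trajectory into
-- maximal same-membership runs (groupby); objective: simpler/idiomatic, same O(n) cost.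

-- ===== PORT A =====
-- loop body of A: state = (start, prev_mode, existing, new); prev_mode ∈ {none, some true(="existing"), some false(="new")};
-- in A, start ≠ None implies prev_mode ≠ None, so 'pm.getD false' only ever reads an actual mode.
def pvStepA (mem : Int → Bool)
    (st : Option Int × Option Bool × List (Int × Int) × List (Int × Int))
    (p : Int × Int) :
    Option Int × Option Bool × List (Int × Int) × List (Int × Int) :=
  match st, p with
  | (start, pm, ex, nw), (idx, snap) =>
    let mode := mem snap
    if some mode ≠ pm then
      match start with
      | none => (some idx, some mode, ex, nw)
      | some s =>
        if pm.getD false then (some idx, some mode, ex ++ [(s, idx)], nw)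
        else (some idx, some mode, ex, nw ++ [(s, idx)])
    else (start, some mode, ex, nw)

def make_segments (prev : List Int) (trial : List Int) : (List (Int × Int)) × (List (Int × Int)) :=
  let prevS := PySem.Set.ofList prev
  let st := (PySem.List.enumerate trial 0).foldl (pvStepA (fun s => PySem.Set.contains prevS s)) (none, none, [], [])
  match st with
  | (start, pm, ex, nw) =>
    match pm with
    | none => (ex, nw)
    | some m =>
      -- leftover Python loop variable idx = last index; pm ≠ None means the loop ran
      let lastIdx : Int := (trial.length : Int) - 1
      if m then (ex ++ [(start.getD 0, lastIdx + 1)], nw)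
      else (ex, nw ++ [(start.getD 0, lastIdx + 1)])

-- ===== PORT B =====
-- groupby over membership: peel the maximal run sharing the head's key, record one segment, recurse
def pvRuns (mem : Int → Bool) (idx : Int) : List Int → (List (Int × Int)) × (List (Int × Int))
  | [] => ([], [])
  | x :: xs =>
    let k := mem x
    let len : Int := 1 + (xs.takeWhile (fun y => mem y == k)).length
    let r := pvRuns mem (idx + len) (xs.dropWhile (fun y => mem y == k))
    if k then ((idx, idx + len) :: r.1, r.2) else (r.1, (idx, idx + len) :: r.2)
  termination_by l => l.length
  decreasing_by
    simp only [List.length_cons]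
    exact Nat.lt_succ_of_le (List.length_dropWhile_le _ _)

def make_segments_alt (prev : List Int) (trial : List Int) : (List (Int × Int)) × (List (Int × Int)) :=
  let prevS := PySem.Set.ofList prev
  pvRuns (fun s => PySem.Set.contains prevS s) 0 trial

-- ===== PRECONDITION & SPEC =====
def Spec_make_segments (prev : List Int) (trial : List Int) (out : (List (Int × Int)) × (List (Int × Int))) : Prop := out = make_segments_alt prev trial
instance (prev : List Int) (trial : List Int) (out : (List (Int × Int)) × (List (Int × Int))) : Decidable (Spec_make_segments prev trial out) := by unfold Spec_make_segments; infer_instance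

-- ===== CLAIM (what is proved, stated in full; the proofs are below) =====
def Claim_equal_make_segments : Prop := ∀ (prev : List Int) (trial : List Int), Dom_make_segments prev trial → Spec_make_segments prev trial (make_segments prev trial)

-- ===== LEMMAS AND PROOFS =====

-- A's post-loop step, as a function of the final state and the value idx+1
def pvPost (st : Option Int × Option Bool × List (Int × Int) × List (Int × Int)) (n : Int) :
    (List (Int × Int)) × (List (Int × Int)) :=
  match st with
  | (start, pm, ex, nw) =>
    match pm with
    | none => (ex, nw)
    | some m =>
      if m then (ex ++ [(start.getD 0, n)], nw)
      else (ex, nw ++ [(start.getD 0, n)])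

lemma make_segments_eq_post (prev trial) :
    make_segments prev trial =
      pvPost ((PySem.List.enumerate trial 0).foldl
        (pvStepA (fun s => PySem.Set.contains (PySem.Set.ofList prev) s)) (none, none, [], []))
        (((trial.length : Int) - 1) + 1) := by
  simp only [make_segments, pvPost]

lemma dropWhile_cons_head_false {α : Type} (p : α → Bool) :
    ∀ (l : List α) (y : α) (r : List α), l.dropWhile p = y :: r → p y = false := by
  intro l
  induction l with
  | nil => intro y r h; simp [List.dropWhile] at h
  | cons a t ih =>
    intro y r h
    by_cases hp : p a = true
    · rw [List.dropWhile_cons_of_pos hp] at h; exact ih y r h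
    · rw [List.dropWhile_cons_of_neg hp] at h
      cases h; simpa using hp

-- inside a run (same mode as prev_mode) the state is unchanged
lemma fold_same (mem : Int → Bool) (k : Bool) :
    ∀ (g : List Int) (i s : Int) (ex nw : List (Int × Int)), (∀ y ∈ g, mem y = k) →
      (PySem.List.enumerate g i).foldl (pvStepA mem) (some s, some k, ex, nw)
        = (some s, some k, ex, nw) := by
  intro g
  induction g with
  | nil => intro i s ex nw _; simp [PySem.List.enumerate_nil]
  | cons y ys ih =>
    intro i s ex nw h
    have hy : mem y = k := h y (by simp)
    simp only [PySem.List.enumerate_cons, List.foldl_cons]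
    have hstep : pvStepA mem (some s, some k, ex, nw) (i, y) = (some s, some k, ex, nw) := by
      simp [pvStepA, hy]
    rw [hstep]
    exact ih (i + 1) s ex nw (fun z hz => h z (by simp [hz]))

-- main invariant: A's loop over a nonempty suffix from a fresh state, followed by A's
-- post-step at index idx + length, yields exactly the accumulated lists ++ B's runs.
lemma foldA_runs (mem : Int → Bool) :
    ∀ (n : Nat) (trial : List Int), trial.length ≤ n → trial ≠ [] →
      ∀ (idx : Int) (ex nw : List (Int × Int)),
      pvPost ((PySem.List.enumerate trial idx).foldl (pvStepA mem) (none, none, ex, nw))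
          (idx + (trial.length : Int))
        = (ex ++ (pvRuns mem idx trial).1, nw ++ (pvRuns mem idx trial).2) := by
  intro n
  induction n with
  | zero =>
    intro trial hlen hne
    cases trial with
    | nil => exact absurd rfl hne
    | cons x xs => simp at hlen
  | succ n ih =>
    intro trial hlen hne idx ex nw
    cases trial with
    | nil => exact absurd rfl hne
    | cons x xs =>
      obtain ⟨k, hk⟩ : ∃ k, mem x = k := ⟨_, rfl⟩
      obtain ⟨g, hg⟩ : ∃ g, List.takeWhile (fun y => mem y == k) xs = g := ⟨_, rfl⟩
      obtain ⟨rest, hrest⟩ : ∃ r, List.dropWhile (fun y => mem y == k) xs = r := ⟨_, rfl⟩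
      have hxs : g ++ rest = xs := by rw [← hg, ← hrest]; exact List.takeWhile_append_dropWhile
      have hgmem : ∀ y ∈ g, mem y = k := by
        intro y hy
        rw [← hg] at hy
        have := List.mem_takeWhile_imp hy
        simpa using this
      -- unfold pvRuns once, naming the run split
      have hruns : pvRuns mem idx (x :: xs) =
          (if k then ((idx, idx + (1 + (g.length : Int))) :: (pvRuns mem (idx + (1 + (g.length : Int))) rest).1,
                      (pvRuns mem (idx + (1 + (g.length : Int))) rest).2)
           else ((pvRuns mem (idx + (1 + (g.length : Int))) rest).1,
                 (idx, idx + (1 + (g.length : Int))) :: (pvRuns mem (idx + (1 + (g.length : Int))) rest).2)) := by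
        rw [pvRuns]
        simp only [hk, hg, hrest]
      -- first step of the fold
      have hstep1 : pvStepA mem (none, none, ex, nw) (idx, x) = (some idx, some k, ex, nw) := by
        simp [pvStepA, hk]
      have henum : PySem.List.enumerate xs (idx + 1)
          = PySem.List.enumerate g (idx + 1) ++ PySem.List.enumerate rest (idx + 1 + (g.length : Int)) := by
        conv_lhs => rw [← hxs]
        rw [PySem.List.enumerate_append]
      rw [hruns, PySem.List.enumerate_cons, List.foldl_cons, hstep1, henum, List.foldl_append,
        fold_same mem k g (idx + 1) idx ex nw hgmem]
      cases rest with
      | nil =>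
        have hgx : g = xs := by simpa using hxs
        subst hgx
        simp only [PySem.List.enumerate_nil, List.foldl_nil, pvPost, pvRuns]
        have harith : idx + ((x :: g).length : Int) = idx + (1 + (g.length : Int)) := by
          simp [List.length_cons]; ring
        rw [harith]
        cases k <;> simp
      | cons y r' =>
        have hy : mem y ≠ k := by
          have := dropWhile_cons_head_false (fun y => mem y == k) xs y r' hrest
          simpa using this
        -- the transition step on y
        have hstep2 : pvStepA mem (some idx, some k, ex, nw) (idx + 1 + (g.length : Int), y) =
            (some (idx + 1 + (g.length : Int)), some (mem y),
             if k then ex ++ [(idx, idx + 1 + (g.length : Int))] else ex,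
             if k then nw else nw ++ [(idx, idx + 1 + (g.length : Int))]) := by
          have hne' : some (mem y) ≠ some k := by simpa using hy
          simp only [pvStepA, if_pos hne', Option.getD_some]
          cases k <;> simp
        rw [PySem.List.enumerate_cons, List.foldl_cons, hstep2]
        -- the remaining fold is the same as a fresh fold over rest = y :: r'
        have hfresh : ∀ (e n' : List (Int × Int)),
            (PySem.List.enumerate r' (idx + 1 + (g.length : Int) + 1)).foldl (pvStepA mem)
              (some (idx + 1 + (g.length : Int)), some (mem y), e, n')
            = (PySem.List.enumerate (y :: r') (idx + 1 + (g.length : Int))).foldl (pvStepA mem)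
              (none, none, e, n') := by
          intro e n'
          rw [PySem.List.enumerate_cons, List.foldl_cons]
          have : pvStepA mem (none, none, e, n') (idx + 1 + (g.length : Int), y)
              = (some (idx + 1 + (g.length : Int)), some (mem y), e, n') := by
            simp [pvStepA]
          rw [this]
        rw [hfresh]
        have hlen' : (y :: r').length ≤ n := by
          have h1 : (y :: r').length ≤ xs.length := by
            rw [← hrest]; exact List.length_dropWhile_le _ _
          have h2 : xs.length ≤ n := by simpa using hlen
          omega
        have harith : idx + ((x :: xs).length : Int)
            = (idx + 1 + (g.length : Int)) + (((y :: r').length : Int)) := by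
          have h3 : xs.length = g.length + (y :: r').length := by
            rw [← hxs]; simp
          simp only [List.length_cons, h3]; push_cast; ring
        rw [harith,
          ih (y :: r') hlen' (by simp)
            (idx + 1 + (g.length : Int))
            (if k then ex ++ [(idx, idx + 1 + (g.length : Int))] else ex)
            (if k then nw else nw ++ [(idx, idx + 1 + (g.length : Int))])]
        have hidx : idx + (1 + (g.length : Int)) = idx + 1 + (g.length : Int) := by ring
        rw [hidx]
        cases k <;> simp

-- ===== VERDICT (by name: the statement is the Claim_ definition above) =====
theorem make_segments_spec : Claim_equal_make_segments := by
  intro prev trial _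
  unfold Spec_make_segments
  cases trial with
  | nil =>
    simp [make_segments, make_segments_alt, pvRuns, PySem.List.enumerate_nil]
  | cons x xs =>
    rw [make_segments_eq_post]
    have harith : (((x :: xs).length : Int) - 1) + 1 = 0 + ((x :: xs).length : Int) := by ring
    rw [harith,
      foldA_runs (fun s => PySem.Set.contains (PySem.Set.ofList prev) s)
        (x :: xs).length (x :: xs) le_rfl (by simp) 0 [] []]
    simp [make_segments_alt]
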